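-- pv_equiv track=rewrite | github.com/oduodg/Python-Algorithm | Programmers/모의고사.py | solution
-- ===== SOURCE A (Python) =====
-- from collections import deque
-- import math
--
-- def solution(answers):
--
--     num1 = deque([1,2,3,4,5] * math.ceil((len(answers)/5)))
--     num2 = deque([2,1,2,3,2,4,2,5] * math.ceil((len(answers)/8)))
--     num3 = deque([3,3,1,1,2,2,4,4,5,5] * math.ceil((len(answers)/10)))
--
--     score1 = 0
--     score2 = 0
--     score3 = 0
--
--     for answer in answers:
--         if answer == num1.popleft():
--             score1 += 1
--         if answer == num2.popleft():
--             score2 += 1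
--         if answer == num3.popleft():
--             score3 += 1
--
--     result = []
--     scores = [score1, score2, score3]
--     for i in range(len(scores)):
--         if(scores[i] == max(scores)):
--             result.append(i+1)
--
--
--     return sorted(result)
-- ===== SOURCE B (Python) =====
-- from collections import Counter
--
-- def solution(answers):
--     # Frequency index: how often each answer value occurs at each position class mod 40
--     # (40 = lcm of the three pattern lengths 5, 8, 10).
--     cnt = Counter((i % 40, a) for i, a in enumerate(answers))
--     patterns = [[1, 2, 3, 4, 5],
--                 [2, 1, 2, 3, 2, 4, 2, 5],
--                 [3, 3, 1, 1, 2, 2, 4, 4, 5, 5]]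
--     scores = [sum(cnt[(j, p[j % len(p)])] for j in range(40)) for p in patterns]
--     best = max(scores)
--     return [k + 1 for k, s in enumerate(scores) if s == best]
-- ===== Notes on version B (the rewrite author's own statement) =====
-- stated objective: alternative
-- what changed: Instead of comparing each answer to the three cyclic patterns (A's deque pop-and-compare loop), B builds a frequency Counter keyed by (position mod 40, answer value) in one pass and then computes each pattern's score by 120 constant-time lookups over the 40-long common cycle, so the per-answer pattern comparisons disappear.
import Mathlib
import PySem

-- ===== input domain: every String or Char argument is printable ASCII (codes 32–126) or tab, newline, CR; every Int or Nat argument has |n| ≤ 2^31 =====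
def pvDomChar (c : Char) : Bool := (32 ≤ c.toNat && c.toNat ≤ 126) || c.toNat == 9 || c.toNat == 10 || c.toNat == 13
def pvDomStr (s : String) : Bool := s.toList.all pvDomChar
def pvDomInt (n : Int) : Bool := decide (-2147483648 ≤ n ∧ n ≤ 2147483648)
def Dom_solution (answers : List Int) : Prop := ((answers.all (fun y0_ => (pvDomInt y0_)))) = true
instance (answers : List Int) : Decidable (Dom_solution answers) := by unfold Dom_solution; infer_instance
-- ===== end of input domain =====

-- B replaces A's pattern-comparison loop (three deques popped alongside the answers)
-- by a frequency Counter keyed by (position mod 40, answer) built in one pass, scoring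
-- each pattern by 40 lookups over the common cycle (objective: alternative); same return value.

-- ===== PORT A =====
-- one iteration of A's for-loop: pop the head of each deque, conditionally bump each score
def stepA (st : List Int × List Int × List Int × Int × Int × Int) (answer : Int) :
    List Int × List Int × List Int × Int × Int × Int :=
  (st.1.tail, st.2.1.tail, st.2.2.1.tail,
   if some answer = st.1.head? then st.2.2.2.1 + 1 else st.2.2.2.1,
   if some answer = st.2.1.head? then st.2.2.2.2.1 + 1 else st.2.2.2.2.1,
   if some answer = st.2.2.1.head? then st.2.2.2.2.2 + 1 else st.2.2.2.2.2)

-- math.ceil(len(answers)/k) is exact Nat ceiling division here (the float len/k has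
-- relative error < 2^-52, never enough to cross an integer for any realisable length)
def solution (answers : List Int) : List Int :=
  let num1 := (List.replicate ((answers.length + 4) / 5) [1,2,3,4,5]).flatten
  let num2 := (List.replicate ((answers.length + 7) / 8) [2,1,2,3,2,4,2,5]).flatten
  let num3 := (List.replicate ((answers.length + 9) / 10) [3,3,1,1,2,2,4,4,5,5]).flatten
  let st := answers.foldl stepA (num1, num2, num3, 0, 0, 0)
  let scores : List Int := [st.2.2.2.1, st.2.2.2.2.1, st.2.2.2.2.2]
  let result := (PySem.List.pyRange 0 (scores.length : Int) 1).foldl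
    (fun r i => if PySem.List.pyGet? scores i = PySem.List.max? scores (fun x => x)
                then r ++ [i + 1] else r) ([] : List Int)
  PySem.List.sorted result (fun x => x) false

-- ===== PORT B =====
-- the generator (i % 40, a) for i, a in enumerate(answers)
def keysB (answers : List Int) : List (Int × Int) :=
  (PySem.List.enumerate answers 0).map (fun ia => (PySem.Int.mod ia.1 40, ia.2))

def solution_alt (answers : List Int) : List Int :=
  let cnt := PySem.Dict.counter (keysB answers)
  let patterns : List (List Int) :=
    [[1,2,3,4,5], [2,1,2,3,2,4,2,5], [3,3,1,1,2,2,4,4,5,5]]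
  let scores := patterns.map (fun p =>
    ((PySem.List.pyRange 0 40 1).map
      (fun j => cnt.getD (j, PySem.List.pyGetD p (PySem.Int.mod j (p.length : Int)) 0) 0)).sum)
  let best := (PySem.List.max? scores (fun x => x)).getD 0
  (PySem.List.enumerate scores 0).foldl
    (fun r is => if is.2 = best then r ++ [is.1 + 1] else r) ([] : List Int)

-- ===== PRECONDITION & SPEC =====
def Spec_solution (answers : List Int) (out : List Int) : Prop := out = solution_alt answers
instance (answers : List Int) (out : List Int) : Decidable (Spec_solution answers out) := by unfold Spec_solution; infer_instance

-- ===== CLAIM (what is proved, stated in full; the proofs are below) =====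
def Claim_equal_solution : Prop := ∀ (answers : List Int), Dom_solution answers → Spec_solution answers (solution answers)

-- ===== LEMMAS AND PROOFS =====

-- matches of the answer list against (the front of) a queue, as A's loop counts them
def cntA : List Int → List Int → Int
  | [], _ => 0
  | a :: as, q => (if some a = q.head? then 1 else 0) + cntA as q.tail

-- matches counted against the pattern cycled by modulo indexing, starting at position j
def cntB (p : List Int) : List Int → Nat → Int
  | [], _ => 0
  | a :: as, j => (if a = p.getD (j % p.length) 0 then 1 else 0) + cntB p as (j + 1)

theorem foldl_stepA (as : List Int) :
    ∀ (q1 q2 q3 : List Int) (s1 s2 s3 : Int),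
    as.foldl stepA (q1, q2, q3, s1, s2, s3) =
      (q1.drop as.length, q2.drop as.length, q3.drop as.length,
       s1 + cntA as q1, s2 + cntA as q2, s3 + cntA as q3) := by
  induction as with
  | nil => intro q1 q2 q3 s1 s2 s3; simp [cntA]
  | cons a as ih =>
    intro q1 q2 q3 s1 s2 s3
    simp only [List.foldl_cons, stepA, ih, cntA, List.length_cons, Prod.mk.injEq]
    refine ⟨?_, ?_, ?_, ?_, ?_, ?_⟩ <;>
      first
        | (rw [← List.drop_one, List.drop_drop]; congr 1; omega)
        | (split_ifs <;> ring)

theorem flatten_replicate_getElem? (p : List Int) :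
    ∀ (k j : Nat), j < k * p.length →
    ((List.replicate k p).flatten)[j]? = some (p.getD (j % p.length) 0) := by
  intro k
  induction k with
  | zero => intro j h; omega
  | succ k ih =>
    intro j h
    rw [List.replicate_succ, List.flatten_cons]
    by_cases hj : j < p.length
    · rw [List.getElem?_append_left hj, Nat.mod_eq_of_lt hj,
        List.getElem?_eq_getElem hj, List.getD_eq_getElem?_getD,
        List.getElem?_eq_getElem hj]
      rfl
    · rw [Nat.not_lt] at hj
      rw [List.getElem?_append_right hj, ih (j - p.length) (by
        have hkn : (k + 1) * p.length = k * p.length + p.length := by ring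
        omega)]
      congr 1
      rw [Nat.mod_eq_sub_mod hj]

theorem cntA_cycle (p : List Int) :
    ∀ (as : List Int) (j k : Nat), j + as.length ≤ k * p.length →
    cntA as (((List.replicate k p).flatten).drop j) = cntB p as j := by
  intro as
  induction as with
  | nil => intro j k _; simp [cntA, cntB]
  | cons a as ih =>
    intro j k h
    simp only [cntA, cntB, List.head?_drop, List.tail_drop]
    rw [flatten_replicate_getElem? p k j (by simp at h ⊢; omega)]
    rw [ih (j + 1) k (by simp at h ⊢; omega)]
    simp

-- the 0/1 indicator sum over a duplicate-free index list containing r picks out r's term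
theorem sum_ind_not_mem (f : Int → Int) (a r : Int) :
    ∀ (J : List Int), r ∉ J →
    (J.map (fun j => if (r, a) = (j, f j) then (1 : Int) else 0)).sum = 0 := by
  intro J
  induction J with
  | nil => intro _; simp
  | cons j J ih =>
    intro hr
    simp only [List.map_cons, List.sum_cons]
    rw [ih (fun h => hr (List.mem_cons_of_mem _ h))]
    have hne : ((r, a) : Int × Int) ≠ (j, f j) := by
      intro hc
      exact hr (by simp [Prod.ext_iff] at hc; simp [hc.1])
    simp [hne]

theorem sum_ind (f : Int → Int) (a r : Int) :
    ∀ (J : List Int), J.Nodup → r ∈ J →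
    (J.map (fun j => if (r, a) = (j, f j) then (1 : Int) else 0)).sum
      = if a = f r then 1 else 0 := by
  intro J
  induction J with
  | nil => intro _ h; cases h
  | cons j J ih =>
    intro hnd hr
    rw [List.nodup_cons] at hnd
    simp only [List.map_cons, List.sum_cons]
    rcases List.mem_cons.mp hr with h | h
    · subst h
      rw [sum_ind_not_mem f a r J hnd.1]
      simp only [Prod.mk.injEq, true_and, add_zero]
    · have hj : r ≠ j := fun hc => hnd.1 (hc ▸ h)
      have hne : ¬ (((r, a) : Int × Int) = (j, f j)) := by
        simp only [Prod.mk.injEq]; exact fun hc => hj hc.1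
      rw [ih hnd.2 h]
      simp [hne]

-- summing counts over a list with one more element splits off an indicator sum
theorem sum_count_cons (J : List Int) (g : Int → Int × Int) (x : Int × Int)
    (l : List (Int × Int)) :
    (J.map (fun j => ((x :: l).count (g j) : Int))).sum
      = (J.map (fun j => (l.count (g j) : Int))).sum
        + (J.map (fun j => if x = g j then (1 : Int) else 0)).sum := by
  induction J with
  | nil => simp
  | cons j J ih =>
    simp only [List.map_cons, List.sum_cons, ih]
    have hc : (((x :: l).count (g j) : Nat) : Int)
        = (l.count (g j) : Int) + (if x = g j then (1 : Int) else 0) := by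
      by_cases h : x = g j <;> simp [h]
    rw [hc]
    ring

-- B's per-pattern score equals the modulo-indexed match count, for a pattern whose length divides 40
theorem score_eq (p : List Int) (hd : p.length ∣ 40) :
    ∀ (as : List Int) (s : Nat),
    ((PySem.List.pyRange 0 40 1).map
      (fun j => (((PySem.List.enumerate as (s : Int)).map
          (fun ia => (PySem.Int.mod ia.1 40, ia.2))).count
            (j, PySem.List.pyGetD p (PySem.Int.mod j (p.length : Int)) 0) : Int))).sum
      = cntB p as s := by
  intro as
  induction as with
  | nil =>
    intro s
    simp only [PySem.List.enumerate_nil, List.map_nil, List.count_nil, Nat.cast_zero, cntB]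
    exact List.sum_eq_zero (by simp)
  | cons a as ih =>
    intro s
    have hcast : ((s : Int) + 1) = (((s + 1 : Nat)) : Int) := by push_cast; ring
    have hmods : PySem.Int.mod (s : Int) 40 = ((s % 40 : Nat) : Int) := by
      exact_mod_cast PySem.Int.mod_natCast s 40
    simp only [PySem.List.enumerate_cons, List.map_cons, hcast, hmods]
    rw [sum_count_cons (PySem.List.pyRange 0 40 1)
      (fun j => ((j, PySem.List.pyGetD p (PySem.Int.mod j (p.length : Int)) 0) : Int × Int))
      (((s % 40 : Nat) : Int), a)]
    rw [ih (s + 1)]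
    rw [sum_ind (fun j => PySem.List.pyGetD p (PySem.Int.mod j (p.length : Int)) 0) a
      (((s % 40 : Nat) : Int)) (PySem.List.pyRange 0 40 1) (by decide)
      (by rw [PySem.List.mem_pyRange_one]
          have := Nat.mod_lt s (show 0 < 40 by decide)
          omega)]
    have h1 : PySem.Int.mod (((s % 40 : Nat) : Int)) (p.length : Int)
        = (((s % 40) % p.length : Nat) : Int) := by
      exact_mod_cast PySem.Int.mod_natCast (s % 40) p.length
    rw [h1, Nat.mod_mod_of_dvd s hd, PySem.List.pyGetD_natCast]
    simp only [cntB]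
    ring

-- the tail computations agree on any triple of scores
theorem tail_eq (s1 s2 s3 : Int) :
    (let scores : List Int := [s1, s2, s3]
     PySem.List.sorted
       ((PySem.List.pyRange 0 (scores.length : Int) 1).foldl
         (fun r i => if PySem.List.pyGet? scores i = PySem.List.max? scores (fun x => x)
                     then r ++ [i + 1] else r) ([] : List Int)) (fun x => x) false)
    = (let scores : List Int := [s1, s2, s3]
       let best := (PySem.List.max? scores (fun x => x)).getD 0
       (PySem.List.enumerate scores 0).foldl
         (fun r is => if is.2 = best then r ++ [is.1 + 1] else r) ([] : List Int)) := by
  have hr : PySem.List.pyRange 0 ((3 : Nat) : Int) 1 = [0, 1, 2] := by decide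
  have hm : PySem.List.max? [s1, s2, s3] (fun x => x) = some (max (max s1 s2) s3) := by
    rw [PySem.List.max?_id_cons]; simp [max_assoc]
  simp only [List.length_cons, List.length_nil, hr, hm, List.foldl_cons, List.foldl_nil,
    PySem.List.enumerate_cons, PySem.List.enumerate_nil, Option.getD_some]
  have h0 : PySem.List.pyGet? [s1, s2, s3] 0 = some s1 := by
    simp
  have h1 : PySem.List.pyGet? [s1, s2, s3] 1 = some s2 := by
    rw [show (1 : Int) = ((1 : Nat) : Int) from rfl, PySem.List.pyGet?_natCast]; rfl
  have h2 : PySem.List.pyGet? [s1, s2, s3] 2 = some s3 := by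
    rw [show (2 : Int) = ((2 : Nat) : Int) from rfl, PySem.List.pyGet?_natCast]; rfl
  rw [h0, h1, h2]
  simp only [Option.some.injEq]
  split_ifs <;> decide

-- ===== VERDICT (by name: the statement is the Claim_ definition above) =====
theorem solution_spec : Claim_equal_solution := by
  intro answers _
  unfold Spec_solution solution solution_alt keysB
  simp only [List.map_cons, List.map_nil, PySem.Dict.getD_counter]
  rw [foldl_stepA]
  dsimp only
  have hs1 := score_eq [1,2,3,4,5] (by decide) answers 0
  have hs2 := score_eq [2,1,2,3,2,4,2,5] (by decide) answers 0
  have hs3 := score_eq [3,3,1,1,2,2,4,4,5,5] (by decide) answers 0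
  simp only [Nat.cast_zero] at hs1 hs2 hs3
  rw [hs1, hs2, hs3]
  have h1 : cntB [1,2,3,4,5] answers 0
      = cntA answers ((List.replicate ((answers.length + 4) / 5) [1,2,3,4,5]).flatten) := by
    rw [← cntA_cycle [1,2,3,4,5] answers 0 ((answers.length + 4) / 5) (by simp; omega)]
    simp
  have h2 : cntB [2,1,2,3,2,4,2,5] answers 0
      = cntA answers ((List.replicate ((answers.length + 7) / 8) [2,1,2,3,2,4,2,5]).flatten) := by
    rw [← cntA_cycle [2,1,2,3,2,4,2,5] answers 0 ((answers.length + 7) / 8) (by simp; omega)]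
    simp
  have h3 : cntB [3,3,1,1,2,2,4,4,5,5] answers 0
      = cntA answers ((List.replicate ((answers.length + 9) / 10) [3,3,1,1,2,2,4,4,5,5]).flatten) := by
    rw [← cntA_cycle [3,3,1,1,2,2,4,4,5,5] answers 0 ((answers.length + 9) / 10) (by simp; omega)]
    simp
  rw [h1, h2, h3]
  simp only [zero_add]
  simpa using tail_eq _ _ _
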